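-- pv_equiv track=rewrite | github.com/piyush-man/kubeeasy | rag/intent.py | _extract_namespace
-- ===== SOURCE A (Python) =====
-- def _extract_namespace(query: str, data: list) -> str | None:
--     namespaces = sorted(
--         list(set(r.get("namespace", "") for r in data if r.get("namespace"))),
--         key=len, reverse=True
--     )
--     for ns in namespaces:
--         if ns.lower() in query:
--             return ns
--     return None
-- ===== SOURCE B (Python) =====
-- def _extract_namespace(query: str, data: list) -> str | None:
--     # Single pass over data: keep the longest namespace whose lowercase form
--     # occurs in the query (strict '>' keeps the earliest among equal lengths).
--     best = None
--     for r in data: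
--         ns = r.get("namespace")
--         if ns and ns.lower() in query and (best is None or len(ns) > len(best)):
--             best = ns
--     return best
-- ===== Notes on version B (the rewrite author's own statement) =====
-- stated objective: simpler
-- what changed: Replaces build-set-then-sort-by-length-then-scan with a single linear pass over data that keeps the longest matching namespace (strict '>' for ties), dropping the set and the sort entirely.
import Mathlib
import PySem

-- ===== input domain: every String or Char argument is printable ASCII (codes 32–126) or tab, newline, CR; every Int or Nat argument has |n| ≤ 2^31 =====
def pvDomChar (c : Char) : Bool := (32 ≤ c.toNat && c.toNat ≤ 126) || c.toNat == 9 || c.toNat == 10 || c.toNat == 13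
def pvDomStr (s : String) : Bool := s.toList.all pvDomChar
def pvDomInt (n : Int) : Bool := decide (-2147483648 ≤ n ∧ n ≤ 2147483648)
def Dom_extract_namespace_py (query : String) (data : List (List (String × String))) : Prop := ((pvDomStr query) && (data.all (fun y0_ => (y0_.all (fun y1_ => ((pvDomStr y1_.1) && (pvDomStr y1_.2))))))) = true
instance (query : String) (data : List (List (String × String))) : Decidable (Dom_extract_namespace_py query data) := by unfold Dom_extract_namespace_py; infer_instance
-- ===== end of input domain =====

-- B replaces A's build-set / sort-by-length / scan with one linear pass over the data
-- keeping the longest matching namespace (objective: simpler; same substring checks).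


-- ===== PORT A =====
-- r.get("namespace", "") kept when r.get("namespace") is truthy (non-None, non-empty)
def pvNsOf (r : List (String × String)) : Option String :=
  match PySem.Dict.get? (PySem.Dict.mk r) "namespace" with
  | some s => if s = "" then none else some s
  | none => none

def extract_namespace_py (query : String) (data : List (List (String × String))) : Option String :=
  let namespaces :=
    PySem.List.sorted (PySem.Set.ofList (data.filterMap pvNsOf))
      (fun ns => PySem.Str.len ns) true
  namespaces.find? (fun ns => PySem.Str.isIn (PySem.Str.lower ns) query)

-- ===== PORT B =====
-- 'best is None or len(ns) > len(best)'
def pvBetter (best : Option String) (ns : String) : Bool :=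
  match best with
  | none => true
  | some b => decide (PySem.Str.len b < PySem.Str.len ns)

def extract_namespace_py_alt (query : String) (data : List (List (String × String))) : Option String :=
  data.foldl (fun best r =>
    match PySem.Dict.get? (PySem.Dict.mk r) "namespace" with
    | none => best
    | some ns =>
      if ns ≠ "" ∧ PySem.Str.isIn (PySem.Str.lower ns) query = true ∧ pvBetter best ns = true
      then some ns else best) none

-- ===== PRECONDITION & SPEC =====
-- Pre_ excludes inputs carrying two DISTINCT non-empty namespace values of equal length
-- that both occur (lowercased) in the query: on those A's result depends on Python's
-- accidental set-iteration (hash) order, so neither value is specified.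
def Pre_extract_namespace_py (query : String) (data : List (List (String × String))) : Prop :=
  ∀ r₁ ∈ data, ∀ r₂ ∈ data,
    PySem.Dict.getD (PySem.Dict.mk r₁) "namespace" "" ≠ "" →
    PySem.Dict.getD (PySem.Dict.mk r₂) "namespace" "" ≠ "" →
    PySem.Str.isIn (PySem.Str.lower (PySem.Dict.getD (PySem.Dict.mk r₁) "namespace" "")) query = true →
    PySem.Str.isIn (PySem.Str.lower (PySem.Dict.getD (PySem.Dict.mk r₂) "namespace" "")) query = true →
    PySem.Str.len (PySem.Dict.getD (PySem.Dict.mk r₁) "namespace" "") =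
      PySem.Str.len (PySem.Dict.getD (PySem.Dict.mk r₂) "namespace" "") →
    PySem.Dict.getD (PySem.Dict.mk r₁) "namespace" "" = PySem.Dict.getD (PySem.Dict.mk r₂) "namespace" ""
instance (query : String) (data : List (List (String × String))) : Decidable (Pre_extract_namespace_py query data) := by unfold Pre_extract_namespace_py; infer_instance

def pvWitness_extract_namespace_py : String × (List (List (String × String))) :=
  ("deploy to prod now", [[("namespace", "prod")], [("namespace", "dev")]])

def Spec_extract_namespace_py (query : String) (data : List (List (String × String))) (out : Option String) : Prop := out = extract_namespace_py_alt query data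
instance (query : String) (data : List (List (String × String))) (out : Option String) : Decidable (Spec_extract_namespace_py query data out) := by unfold Spec_extract_namespace_py; infer_instance

-- ===== CLAIM (what is proved, stated in full; the proofs are below) =====
def Claim_equal_extract_namespace_py : Prop := ∀ (query : String) (data : List (List (String × String))), Dom_extract_namespace_py query data → Pre_extract_namespace_py query data → Spec_extract_namespace_py query data (extract_namespace_py query data)

-- ===== LEMMAS AND PROOFS =====

-- the step of B's fold, seen on the extracted (non-empty) namespace values
def pvG (query : String) (best : Option String) (ns : String) : Option String :=
  if PySem.Str.isIn (PySem.Str.lower ns) query = true ∧ pvBetter best ns = true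
  then some ns else best

-- B's per-row step, seen through the extracted namespace value
theorem pvStep_eq (query : String) (best : Option String) (r : List (String × String)) :
    (match PySem.Dict.get? (PySem.Dict.mk r) "namespace" with
      | none => best
      | some ns =>
        if ns ≠ "" ∧ PySem.Str.isIn (PySem.Str.lower ns) query = true ∧ pvBetter best ns = true
        then some ns else best)
    = (match pvNsOf r with
      | none => best
      | some ns => pvG query best ns) := by
  unfold pvNsOf
  cases hg : PySem.Dict.get? (PySem.Dict.mk r) "namespace" with
  | none => rfl
  | some s =>
    by_cases hs : s = ""
    · subst hs; simp
    · simp only []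
      rw [if_neg hs]
      simp [pvG, hs]

-- B's fold over the rows equals the pvG-fold over the extracted namespace values
theorem pvB_eq_foldG (query : String) (data : List (List (String × String))) :
    ∀ acc : Option String,
      data.foldl (fun best r =>
        match PySem.Dict.get? (PySem.Dict.mk r) "namespace" with
        | none => best
        | some ns =>
          if ns ≠ "" ∧ PySem.Str.isIn (PySem.Str.lower ns) query = true ∧ pvBetter best ns = true
          then some ns else best) acc
      = (data.filterMap pvNsOf).foldl (pvG query) acc := by
  induction data with
  | nil => intro acc; rfl
  | cons r t ih =>
    intro acc
    simp only [List.foldl_cons, List.filterMap_cons]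
    rw [pvStep_eq query acc r]
    cases hf : pvNsOf r with
    | none => exact ih acc
    | some ns => simp only [List.foldl_cons]; exact ih (pvG query acc ns)

theorem pvG_mono (query : String) (l : List String) :
    ∀ b : String, ∃ c, l.foldl (pvG query) (some b) = some c ∧ PySem.Str.len b ≤ PySem.Str.len c := by
  induction l with
  | nil => intro b; exact ⟨b, rfl, le_refl _⟩
  | cons x t ih =>
    intro b
    simp only [List.foldl_cons]
    unfold pvG
    split_ifs with h
    · obtain ⟨c, hc, hbc⟩ := ih x
      have hlt : PySem.Str.len b < PySem.Str.len x := by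
        have h2 := h.2; unfold pvBetter at h2; exact of_decide_eq_true h2
      exact ⟨c, hc, le_of_lt (lt_of_lt_of_le hlt hbc)⟩
    · exact ih b

theorem pvG_ub (query : String) (l : List String) :
    ∀ acc : Option String, ∀ y ∈ l, PySem.Str.isIn (PySem.Str.lower y) query = true →
      ∃ c, l.foldl (pvG query) acc = some c ∧ PySem.Str.len y ≤ PySem.Str.len c := by
  induction l with
  | nil => intro _ y hy; cases hy
  | cons x t ih =>
    intro acc y hy hmy
    simp only [List.foldl_cons]
    rcases List.mem_cons.mp hy with rfl | hyt
    · show ∃ c, t.foldl (pvG query) (pvG query acc y) = some c ∧ _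
      unfold pvG
      split_ifs with h
      · exact pvG_mono query t y
      · cases acc with
        | none => exact absurd ⟨hmy, rfl⟩ h
        | some b =>
          have hby : PySem.Str.len y ≤ PySem.Str.len b := by
            by_contra hlt
            exact h ⟨hmy, by unfold pvBetter; exact decide_eq_true (by omega)⟩
          obtain ⟨c, hc, hbc⟩ := pvG_mono query t b
          exact ⟨c, hc, le_trans hby hbc⟩
    · exact ih (pvG query acc x) y hyt hmy

theorem pvG_shape (query : String) (l : List String) :
    ∀ acc : Option String, l.foldl (pvG query) acc = acc ∨
      ∃ x ∈ l, l.foldl (pvG query) acc = some x ∧ PySem.Str.isIn (PySem.Str.lower x) query = true := by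
  induction l with
  | nil => intro acc; exact Or.inl rfl
  | cons z t ih =>
    intro acc
    simp only [List.foldl_cons]
    rcases ih (pvG query acc z) with h | ⟨x, hx, hfx, hmx⟩
    · rw [h]
      unfold pvG
      split_ifs with hcond
      · exact Or.inr ⟨z, List.mem_cons_self, rfl, hcond.1⟩
      · exact Or.inl rfl
    · exact Or.inr ⟨x, List.mem_cons_of_mem _ hx, hfx, hmx⟩

-- membership in the extracted values names a row
theorem pv_mem_vals (data : List (List (String × String))) (x : String)
    (hx : x ∈ data.filterMap pvNsOf) :
    ∃ r ∈ data, PySem.Dict.get? (PySem.Dict.mk r) "namespace" = some x ∧ x ≠ "" := by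
  obtain ⟨r, hr, hfr⟩ := List.mem_filterMap.mp hx
  refine ⟨r, hr, ?_⟩
  cases hg : PySem.Dict.get? (PySem.Dict.mk r) "namespace" with
  | none => simp [pvNsOf, hg] at hfr
  | some s =>
    by_cases hs : s = ""
    · subst hs; simp [pvNsOf, hg] at hfr
    · simp [pvNsOf, hg, hs] at hfr
      subst hfr
      exact ⟨rfl, hs⟩

-- A's find? over the descending-stable sort: result is a matcher of maximal length
theorem pvA_char (query : String) (vals : List String) (a : String)
    (ha : (PySem.List.sorted (PySem.Set.ofList vals) (fun ns => PySem.Str.len ns) true).find?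
        (fun ns => PySem.Str.isIn (PySem.Str.lower ns) query) = some a) :
    a ∈ vals ∧ PySem.Str.isIn (PySem.Str.lower a) query = true ∧
      ∀ y ∈ vals, PySem.Str.isIn (PySem.Str.lower y) query = true →
        PySem.Str.len y ≤ PySem.Str.len a := by
  have hmem : a ∈ PySem.List.sorted (PySem.Set.ofList vals) (fun ns => PySem.Str.len ns) true :=
    List.mem_of_find?_eq_some ha
  have hmv : a ∈ vals :=
    (PySem.Set.mem_ofList _ _).mp ((PySem.List.mem_sorted _ _ _ _).mp hmem)
  have hpa : PySem.Str.isIn (PySem.Str.lower a) query = true := by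
    simpa using List.find?_some ha
  refine ⟨hmv, hpa, ?_⟩
  intro y hy hmy
  rcases List.find?_eq_some_iff_append.mp ha with ⟨_, pre, post, hsplit, hpre⟩
  have hpw := PySem.List.sorted_pairwise_rev (PySem.Set.ofList vals) (fun ns => PySem.Str.len ns)
  rw [hsplit] at hpw
  have hy' : y ∈ pre ++ a :: post := by
    rw [← hsplit]
    exact (PySem.List.mem_sorted _ _ _ _).mpr ((PySem.Set.mem_ofList _ _).mpr hy)
  rcases List.mem_append.mp hy' with hyp | hyc
  · exact absurd hmy (by simpa using hpre y hyp)
  · rcases List.mem_cons.mp hyc with rfl | hypost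
    · exact le_refl _
    · have := (List.pairwise_append.mp hpw).2.1
      exact (List.pairwise_cons.mp this).1 y hypost

-- find? = none over the sort means no value matches
theorem pvA_none (query : String) (vals : List String)
    (ha : (PySem.List.sorted (PySem.Set.ofList vals) (fun ns => PySem.Str.len ns) true).find?
        (fun ns => PySem.Str.isIn (PySem.Str.lower ns) query) = none) :
    ∀ y ∈ vals, ¬ PySem.Str.isIn (PySem.Str.lower y) query = true := by
  intro y hy hmy
  have hy' : y ∈ PySem.List.sorted (PySem.Set.ofList vals) (fun ns => PySem.Str.len ns) true :=
    (PySem.List.mem_sorted _ _ _ _).mpr ((PySem.Set.mem_ofList _ _).mpr hy)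
  exact List.find?_eq_none.mp ha y hy' hmy

-- ===== VERDICT (by name: the statement is the Claim_ definition above) =====
theorem extract_namespace_py_spec : Claim_equal_extract_namespace_py := by
  intro query data _hdom hpre
  unfold Spec_extract_namespace_py extract_namespace_py extract_namespace_py_alt
  rw [pvB_eq_foldG query data none]
  set vals := data.filterMap pvNsOf with hvals
  cases ha : (PySem.List.sorted (PySem.Set.ofList vals) (fun ns => PySem.Str.len ns) true).find?
      (fun ns => PySem.Str.isIn (PySem.Str.lower ns) query) with
  | none =>
    rcases pvG_shape query vals none with h | ⟨x, hx, hfx, hmx⟩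
    · rw [h]
    · exact absurd hmx (pvA_none query vals ha x hx)
  | some a =>
    obtain ⟨hma, hpa, hmax⟩ := pvA_char query vals a ha
    rcases pvG_shape query vals none with h | ⟨x, hx, hfx, hmx⟩
    · obtain ⟨c, hc, _⟩ := pvG_ub query vals none a hma hpa
      rw [h] at hc; cases hc
    · rw [hfx]
      obtain ⟨ra, hra, hga, hne_a⟩ := pv_mem_vals data a hma
      obtain ⟨rx, hrx, hgx, hne_x⟩ := pv_mem_vals data x hx
      have h1 : PySem.Str.len x ≤ PySem.Str.len a := hmax x hx hmx
      obtain ⟨c, hc, h2⟩ := pvG_ub query vals none a hma hpa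
      rw [hfx] at hc
      cases hc
      have hda : PySem.Dict.getD (PySem.Dict.mk ra) "namespace" "" = a := by
        rw [PySem.Dict.getD_eq_get?_getD, hga]; rfl
      have hdx : PySem.Dict.getD (PySem.Dict.mk rx) "namespace" "" = x := by
        rw [PySem.Dict.getD_eq_get?_getD, hgx]; rfl
      have : a = x := by
        have := hpre ra hra rx hrx
        rw [hda, hdx] at this
        exact this hne_a hne_x hpa hmx (by omega)
      rw [this]
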